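-- pv_equiv track=rewrite | github.com/hadelacruz/ConnectFour-TDLearning | problem.py | count_violations
-- ===== SOURCE A (Python) =====
-- MAX_CAPACITY = 3          # máximo de microservicios por servidor
--
-- ANTI_AFFINITY_PAIRS = [
--     ("M1", "M2"),
--     ("M3", "M4"),
--     ("M5", "M6"),
--     ("M1", "M5"),
-- ]
--
-- def count_violations(assignment: dict) -> int:
--     violations = 0
--
--     # Anti-afinidad
--     for (mi, mj) in ANTI_AFFINITY_PAIRS:
--         if mi in assignment and mj in assignment:
--             if assignment[mi] == assignment[mj]:
--                 violations += 1
--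
--     # Capacidad
--     server_counts = {}
--     for server in assignment.values():
--         server_counts[server] = server_counts.get(server, 0) + 1
--     for cnt in server_counts.values():
--         if cnt > MAX_CAPACITY:
--             violations += 1          # una violación por servidor sobre-cargado
--
--     return violations
-- ===== SOURCE B (Python) =====
-- MAX_CAPACITY = 3          # máximo de microservicios por servidor
--
-- ANTI_AFFINITY_PAIRS = [
--     ("M1", "M2"),
--     ("M3", "M4"),
--     ("M5", "M6"),
--     ("M1", "M5"),
-- ]
--
-- def count_violations(assignment: dict) -> int:
--     # Group microservices by server first, then judge each server group once.
--     groups = {}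
--     for micro, server in assignment.items():
--         groups.setdefault(server, []).append(micro)
--     violations = 0
--     for members in groups.values():
--         if len(members) > MAX_CAPACITY:
--             violations += 1
--         for (mi, mj) in ANTI_AFFINITY_PAIRS:
--             if mi in members and mj in members:
--                 violations += 1
--     return violations
-- ===== Notes on version B (the rewrite author's own statement) =====
-- stated objective: alternative
-- what changed: B first builds an inverse index grouping microservices by server in one pass, then scans each server group once, charging its capacity violation and its anti-affinity pair violations per group, instead of A's two separate passes (global dict lookups per pair, then a value counter).
import Mathlib
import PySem

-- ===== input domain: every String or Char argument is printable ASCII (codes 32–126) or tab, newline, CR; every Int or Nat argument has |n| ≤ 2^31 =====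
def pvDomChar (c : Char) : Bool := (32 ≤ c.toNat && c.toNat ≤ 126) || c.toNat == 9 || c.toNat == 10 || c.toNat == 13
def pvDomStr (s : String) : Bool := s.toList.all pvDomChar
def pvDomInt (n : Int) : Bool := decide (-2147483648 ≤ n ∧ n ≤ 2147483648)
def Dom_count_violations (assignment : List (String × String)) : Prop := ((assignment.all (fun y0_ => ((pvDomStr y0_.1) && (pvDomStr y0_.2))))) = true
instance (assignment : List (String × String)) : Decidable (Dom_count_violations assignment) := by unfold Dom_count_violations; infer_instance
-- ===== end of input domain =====

-- B groups the assignment by server first and judges each server group once (capacity and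
-- anti-affinity together), instead of A's two separate passes; same return value, same cost.

-- module constant ANTI_AFFINITY_PAIRS (shared by both Pythons)
def pvAntiPairs : List (String × String) :=
  [("M1", "M2"), ("M3", "M4"), ("M5", "M6"), ("M1", "M5")]

-- ===== PORT A =====
def count_violations (assignment : List (String × String)) : Int :=
  let d := PySem.Dict.ofList assignment
  let violations : Int := pvAntiPairs.foldl (fun v q =>
    if d.contains q.1 && d.contains q.2 then
      if d.get? q.1 == d.get? q.2 then v + 1 else v
    else v) 0
  let server_counts : PySem.Dict String Int :=
    d.values.foldl (fun sc s => sc.insert s (sc.getD s 0 + 1)) PySem.Dict.empty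
  server_counts.values.foldl (fun v cnt => if cnt > 3 then v + 1 else v) violations

-- ===== PORT B =====
def count_violations_alt (assignment : List (String × String)) : Int :=
  let d := PySem.Dict.ofList assignment
  let groups : PySem.Dict String (List String) :=
    d.items.foldl (fun g p => g.modify p.2 [] (· ++ [p.1])) PySem.Dict.empty
  groups.values.foldl (fun v members =>
    let v := if (members.length : Int) > 3 then v + 1 else v
    pvAntiPairs.foldl (fun v q =>
      if members.contains q.1 && members.contains q.2 then v + 1 else v) v) 0

-- ===== PRECONDITION & SPEC =====
def Spec_count_violations (assignment : List (String × String)) (out : Int) : Prop := out = count_violations_alt assignment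
instance (assignment : List (String × String)) (out : Int) : Decidable (Spec_count_violations assignment out) := by unfold Spec_count_violations; infer_instance

-- ===== CLAIM (what is proved, stated in full; the proofs are below) =====
def Claim_equal_count_violations : Prop := ∀ (assignment : List (String × String)), Dom_count_violations assignment → Spec_count_violations assignment (count_violations assignment)

-- ===== LEMMAS AND PROOFS =====

-- the members assigned to server s, in insertion order
def pvGrp (d : PySem.Dict String String) (s : String) : List String :=
  (d.items.filter (fun p => p.2 == s)).map (·.1)

lemma pv_grp_getD (d : PySem.Dict String String) (s : String) :
    (d.items.foldl (fun g p => g.modify p.2 [] (· ++ [p.1]))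
        (PySem.Dict.empty : PySem.Dict String (List String))).getD s []
      = pvGrp d s := by
  have h : d.items.foldl (fun g p => g.modify p.2 [] (· ++ [p.1]))
        (PySem.Dict.empty : PySem.Dict String (List String))
      = (d.items.map (fun p => (p.2, p.1))).foldl (fun g p => g.modify p.1 [] (· ++ [p.2]))
        (PySem.Dict.empty : PySem.Dict String (List String)) := by
    rw [List.foldl_map]
  rw [h, PySem.Dict.getD_foldl_modify_append]
  simp [pvGrp, PySem.Dict.getD_empty, List.filter_map, List.map_map, Function.comp_def]

lemma pv_grp_keys (d : PySem.Dict String String) :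
    (d.items.foldl (fun g p => g.modify p.2 [] (· ++ [p.1]))
        (PySem.Dict.empty : PySem.Dict String (List String))).keys
      = PySem.Set.ofList d.values := by
  rw [PySem.Dict.keys_foldl_modify_key d.items (fun p => p.2) [] (fun _ p => (· ++ [p.1]))]
  simp [PySem.Dict.keys_empty, PySem.Set.update_nil_left, PySem.Dict.values]

lemma pv_grp_nodup_keys (d : PySem.Dict String String) :
    (d.items.foldl (fun g p => g.modify p.2 [] (· ++ [p.1]))
        (PySem.Dict.empty : PySem.Dict String (List String))).keys.Nodup :=
  PySem.Dict.nodup_keys_foldl_modify_key d.items (fun p => p.2) [] (fun _ p => (· ++ [p.1])) _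
    (by simp [PySem.Dict.keys_empty])

lemma pv_mem_grp (d : PySem.Dict String String) (hnd : d.keys.Nodup) (a s : String) :
    a ∈ pvGrp d s ↔ d.get? a = some s := by
  rw [PySem.Dict.get?_eq_some_iff_mem_items d a s hnd]
  simp only [pvGrp, List.mem_map, List.mem_filter, beq_iff_eq]
  constructor
  · rintro ⟨⟨pa, pb⟩, ⟨hp, rfl⟩, rfl⟩; exact hp
  · intro hp; exact ⟨(a, s), ⟨hp, rfl⟩, rfl⟩

lemma pv_len_grp (d : PySem.Dict String String) (s : String) :
    (pvGrp d s).length = d.values.count s := by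
  simp [pvGrp, ← List.countP_eq_length_filter, PySem.Dict.values, List.count, List.countP_map, Function.comp_def]

lemma pv_grp_contains (d : PySem.Dict String String) (hnd : d.keys.Nodup) (s x : String) :
    (pvGrp d s).contains x = (d.get? x == some s) := by
  rw [Bool.eq_iff_iff]
  simp [pv_mem_grp d hnd x s]

lemma pv_pair_sum (d : PySem.Dict String String) (hnd : d.keys.Nodup) (a b : String) :
    ((PySem.Set.ofList d.values).map
        (fun s => if (pvGrp d s).contains a && (pvGrp d s).contains b then (1 : Int) else 0)).sum
      = if d.contains a && d.contains b && (d.get? a == d.get? b) then 1 else 0 := by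
  cases hga : d.get? a with
  | none =>
    have : d.contains a = false := by rw [PySem.Dict.contains_eq_isSome_get?, hga]; rfl
    rw [List.sum_eq_zero]
    · simp [this]
    · intro x hx
      obtain ⟨s, _, rfl⟩ := List.mem_map.mp hx
      simp only [pv_grp_contains d hnd]
      simp [hga]
  | some sa =>
    cases hgb : d.get? b with
    | none =>
      have : d.contains b = false := by rw [PySem.Dict.contains_eq_isSome_get?, hgb]; rfl
      rw [List.sum_eq_zero]
      · simp [this]
      · intro x hx
        obtain ⟨s, _, rfl⟩ := List.mem_map.mp hx
        simp only [pv_grp_contains d hnd]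
        simp [hgb]
    | some sb =>
      have hca : d.contains a = true := by rw [PySem.Dict.contains_eq_isSome_get?, hga]; rfl
      have hcb : d.contains b = true := by rw [PySem.Dict.contains_eq_isSome_get?, hgb]; rfl
      by_cases hsab : sa = sb
      · subst hsab
        have hmem : sa ∈ PySem.Set.ofList d.values := by
          rw [PySem.Set.mem_ofList]
          have := PySem.Dict.mem_items_of_get?_eq_some d hga
          exact List.mem_map.mpr ⟨(a, sa), this, rfl⟩
        have hmap : ((PySem.Set.ofList d.values).map
              (fun s => if (pvGrp d s).contains a && (pvGrp d s).contains b then (1 : Int) else 0))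
            = ((PySem.Set.ofList d.values).map (fun s => if s == sa then (1 : Int) else 0)) := by
          apply List.map_congr_left
          intro s _
          simp only [pv_grp_contains d hnd, hga, hgb, Bool.and_self]
          by_cases hss : s = sa
          · subst hss; simp
          · simp [hss, Ne.symm hss]
        rw [hmap, PySem.List.sum_map_ite_one_zero]
        have : (PySem.Set.ofList d.values).countP (fun s => s == sa)
            = (PySem.Set.ofList d.values).count sa := rfl
        rw [this, List.count_eq_one_of_mem (PySem.Set.nodup_ofList d.values) hmem]
        simp [hca, hcb]
      · rw [List.sum_eq_zero]
        · simp only [hca, hcb]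
          simp [hsab]
        · intro x hx
          obtain ⟨s, _, rfl⟩ := List.mem_map.mp hx
          simp only [pv_grp_contains d hnd, hga, hgb]
          have h : ¬(sa = s ∧ sb = s) := by rintro ⟨rfl, rfl⟩; exact hsab rfl
          simp [h]

lemma pv_ite_pull (c : Prop) [inst : Decidable c] (acc : Int) :
    (if c then acc + 1 else acc) = acc + (if c then 1 else 0) := by
  split_ifs <;> ring

lemma pv_main (assignment : List (String × String)) :
    count_violations assignment = count_violations_alt assignment := by
  simp only [count_violations, count_violations_alt]
  set d := PySem.Dict.ofList assignment with hd
  have hnd : d.keys.Nodup := PySem.Dict.nodup_keys_ofList assignment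
  set S := PySem.Set.ofList d.values with hS
  -- A side: pairs pass with the combined condition, then capacity via the counter
  rw [PySem.List.foldl_congr_mem pvAntiPairs _
        (fun v q => if d.contains q.1 && d.contains q.2 && (d.get? q.1 == d.get? q.2)
          then v + 1 else v) 0
        (by intro acc q _; cases h1 : (d.contains q.1 && d.contains q.2) <;> simp [h1])]
  rw [PySem.Dict.foldl_insert_getD_add_one_eq_counter]
  -- B side: values of the group dict = groups of the servers, in first-appearance order
  rw [PySem.Dict.values_eq_map_keys _ (pv_grp_nodup_keys d) [], pv_grp_keys d, List.foldl_map]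
  rw [PySem.List.foldl_congr_mem S _
        (fun v s => v + ((if ((pvGrp d s).length : Int) > 3 then 1 else 0)
          + ((if (pvGrp d s).contains "M1" && (pvGrp d s).contains "M2" then 1 else 0)
            + ((if (pvGrp d s).contains "M3" && (pvGrp d s).contains "M4" then 1 else 0)
              + ((if (pvGrp d s).contains "M5" && (pvGrp d s).contains "M6" then 1 else 0)
                + (if (pvGrp d s).contains "M1" && (pvGrp d s).contains "M5" then 1 else 0)))))) 0
        (by
          intro acc s _
          rw [pv_grp_getD d s]
          simp only [pvAntiPairs, List.foldl, pv_ite_pull]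
          ring)]
  rw [PySem.List.foldl_add]
  simp only [PySem.List.sum_map_add_int]
  rw [pv_pair_sum d hnd "M1" "M2", pv_pair_sum d hnd "M3" "M4",
      pv_pair_sum d hnd "M5" "M6", pv_pair_sum d hnd "M1" "M5"]
  -- capacity: A's count of overloaded counters = B's count of big groups
  have hcap : ∀ v : Int, (PySem.Dict.counter d.values).values.foldl
        (fun v cnt => if cnt > 3 then v + 1 else v) v
      = v + (S.map (fun s => if ((pvGrp d s).length : Int) > 3 then (1 : Int) else 0)).sum := by
    intro v
    have hv : (PySem.Dict.counter d.values).values = S.map (fun k => ((d.values.count k : Nat) : Int)) := by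
      show (PySem.Dict.counter d.values).items.map (·.2) = _
      rw [PySem.Dict.items_counter, List.map_map]; rfl
    rw [hv, List.foldl_map, PySem.List.foldl_congr_mem S _
          (fun acc k => acc + (if ((d.values.count k : Nat) : Int) > 3 then (1 : Int) else 0)) v
          (by intro acc k _; rw [pv_ite_pull])]
    rw [PySem.List.foldl_add]
    congr 1
    apply congrArg
    apply List.map_congr_left
    intro s _
    rw [pv_len_grp d s]
  rw [hcap]
  simp only [pvAntiPairs, List.foldl]
  split_ifs <;> ring

-- ===== VERDICT (by name: the statement is the Claim_ definition above) =====
theorem count_violations_spec : Claim_equal_count_violations := by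
  intro assignment _
  exact pv_main assignment
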